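-- pv_equiv track=rewrite | github.com/To3Knee/RealmQuest | api/rolls.py | _apply_keep_drop
-- ===== SOURCE A (Python) =====
-- from typing import Any, Dict, List, Optional, Tuple, Union
--
-- def _apply_keep_drop(rolls: List[int], keep_drop: Optional[str], n: Optional[int]) -> Tuple[List[int], List[int]]:
--     if not rolls:
--         return [], []
--     if not keep_drop or not n:
--         return list(rolls), []
--
--     indexed = list(enumerate(int(x) for x in rolls))
--     indexed_sorted = sorted(indexed, key=lambda t: (t[1], t[0]))
--
--     if keep_drop == "kh":
--         keep = sorted(indexed, key=lambda t: (t[1], t[0]), reverse=True)[:n]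
--         keep_idx = set(i for i, _ in keep)
--     elif keep_drop == "kl":
--         keep = indexed_sorted[:n]
--         keep_idx = set(i for i, _ in keep)
--     elif keep_drop == "dh":
--         drop = sorted(indexed, key=lambda t: (t[1], t[0]), reverse=True)[:n]
--         drop_idx = set(i for i, _ in drop)
--         keep_idx = set(i for i, _ in indexed if i not in drop_idx)
--     elif keep_drop == "dl":
--         drop = indexed_sorted[:n]
--         drop_idx = set(i for i, _ in drop)
--         keep_idx = set(i for i, _ in indexed if i not in drop_idx)
--     else:
--         keep_idx = set(range(len(rolls)))
--
--     kept = [int(v) for i, v in indexed if i in keep_idx]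
--     dropped = [int(v) for i, v in indexed if i not in keep_idx]
--     return kept, dropped
-- ===== SOURCE B (Python) =====
-- from typing import List, Optional, Tuple
--
-- def _apply_keep_drop(rolls: List[int], keep_drop: Optional[str], n: Optional[int]) -> Tuple[List[int], List[int]]:
--     if not rolls:
--         return [], []
--     if not keep_drop or not n or keep_drop not in ("kh", "kl", "dh", "dl"):
--         return list(rolls), []
--
--     ln = len(rolls)
--     m = min(n, ln) if n > 0 else max(ln + n, 0)   # number of dice selected (= len of the slice [:n])
--     high = keep_drop in ("kh", "dh")              # selection order: descending (value, index) vs ascending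
--     keeping = keep_drop in ("kh", "kl")           # selected dice are kept vs dropped
--
--     def outranked(i: int, v: int) -> int:
--         # how many rolls come strictly before (i, v) in the selection order
--         c = 0
--         for j, w in enumerate(rolls):
--             if (w > v or (w == v and j > i)) if high else (w < v or (w == v and j < i)):
--                 c += 1
--         return c
--
--     kept: List[int] = []
--     dropped: List[int] = []
--     for i, v in enumerate(rolls):
--         if (outranked(i, v) < m) == keeping:
--             kept.append(v)
--         else:
--             dropped.append(v)
--     return kept, dropped
-- ===== Notes on version B (the rewrite author's own statement) =====
-- stated objective: alternative
-- what changed: Replaces A's sort-the-(value,index)-pairs + slice + index-set machinery by direct rank counting: each die is kept or dropped according to how many rolls strictly precede it in the selection order, built in one output pass with no sorting and no sets.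
import Mathlib
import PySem

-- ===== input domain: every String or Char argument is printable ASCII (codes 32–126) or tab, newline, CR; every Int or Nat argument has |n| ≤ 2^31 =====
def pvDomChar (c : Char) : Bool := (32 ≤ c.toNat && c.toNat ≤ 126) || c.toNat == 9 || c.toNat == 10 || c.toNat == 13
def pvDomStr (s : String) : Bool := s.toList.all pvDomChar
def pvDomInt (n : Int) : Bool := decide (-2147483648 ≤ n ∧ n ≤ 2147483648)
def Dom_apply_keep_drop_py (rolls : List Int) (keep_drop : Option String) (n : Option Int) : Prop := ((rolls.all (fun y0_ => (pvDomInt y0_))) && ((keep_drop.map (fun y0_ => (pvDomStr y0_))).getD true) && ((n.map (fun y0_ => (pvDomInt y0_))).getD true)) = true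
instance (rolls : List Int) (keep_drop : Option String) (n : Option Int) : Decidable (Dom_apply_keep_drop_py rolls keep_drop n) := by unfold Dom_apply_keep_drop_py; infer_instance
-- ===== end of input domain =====

-- B replaces A's sort-the-(value,index)-pairs + slice + index-set machinery by direct rank
-- counting (keep/drop each die by how many rolls strictly precede it in the selection order),
-- built in one output pass; objective: alternative (not faster).

-- ===== PORT A =====
def apply_keep_drop_py (rolls : List Int) (keep_drop : Option String) (n : Option Int) : List Int × List Int :=
  if rolls.isEmpty then ([], [])
  else
    match keep_drop, n with
    | some kd, some nv =>
      if kd == "" || nv == 0 then (rolls, [])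
      else
        let indexed := PySem.List.enumerate rolls
        let indexedSorted := PySem.List.sorted2 indexed (fun t => t.2) (fun t => t.1)
        let keep_idx : PySem.Set Int :=
          if kd == "kh" then
            PySem.Set.ofList ((PySem.List.slice (PySem.List.sorted2 indexed (fun t => t.2) (fun t => t.1) true) none (some nv)).map (fun t => t.1))
          else if kd == "kl" then
            PySem.Set.ofList ((PySem.List.slice indexedSorted none (some nv)).map (fun t => t.1))
          else if kd == "dh" then
            let dropIdx := PySem.Set.ofList ((PySem.List.slice (PySem.List.sorted2 indexed (fun t => t.2) (fun t => t.1) true) none (some nv)).map (fun t => t.1))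
            PySem.Set.ofList ((indexed.filter (fun t => !(PySem.Set.contains dropIdx t.1))).map (fun t => t.1))
          else if kd == "dl" then
            let dropIdx := PySem.Set.ofList ((PySem.List.slice indexedSorted none (some nv)).map (fun t => t.1))
            PySem.Set.ofList ((indexed.filter (fun t => !(PySem.Set.contains dropIdx t.1))).map (fun t => t.1))
          else
            PySem.Set.ofList (PySem.List.pyRange 0 (rolls.length : Int))
        let kept := (indexed.filter (fun t => PySem.Set.contains keep_idx t.1)).map (fun t => t.2)
        let dropped := (indexed.filter (fun t => !(PySem.Set.contains keep_idx t.1))).map (fun t => t.2)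
        (kept, dropped)
    | _, _ => (rolls, [])

-- ===== PORT B =====
-- how many rolls come strictly before (i, v) in the selection order (Source B's `outranked`)
def pvOutranked (high : Bool) (rolls : List Int) (i v : Int) : Int :=
  (PySem.List.enumerate rolls).foldl
    (fun c t =>
      if (if high then (v < t.2 ∨ (t.2 = v ∧ i < t.1)) else (t.2 < v ∨ (t.2 = v ∧ t.1 < i)))
      then c + 1 else c) 0

def apply_keep_drop_py_alt (rolls : List Int) (keep_drop : Option String) (n : Option Int) : List Int × List Int :=
  if rolls.isEmpty then ([], [])
  else
    -- Python truthiness: keep_drop None/"" and n None/0 are exactly kd == "" / nv == 0 below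
    let kd := keep_drop.getD ""
    let nv := n.getD 0
    if kd == "" || nv == 0 || !(kd == "kh" || kd == "kl" || kd == "dh" || kd == "dl") then (rolls, [])
    else
      let ln : Int := rolls.length
      let m : Int := if 0 < nv then min nv ln else max (ln + nv) 0
      let high := kd == "kh" || kd == "dh"
      let keeping := kd == "kh" || kd == "kl"
      (PySem.List.enumerate rolls).foldl
        (fun acc t =>
          if (decide (pvOutranked high rolls t.1 t.2 < m)) == keeping
          then (acc.1 ++ [t.2], acc.2)
          else (acc.1, acc.2 ++ [t.2])) ([], [])

-- ===== PRECONDITION & SPEC =====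
def Spec_apply_keep_drop_py (rolls : List Int) (keep_drop : Option String) (n : Option Int) (out : List Int × List Int) : Prop := out = apply_keep_drop_py_alt rolls keep_drop n
instance (rolls : List Int) (keep_drop : Option String) (n : Option Int) (out : List Int × List Int) : Decidable (Spec_apply_keep_drop_py rolls keep_drop n out) := by unfold Spec_apply_keep_drop_py; infer_instance

-- ===== CLAIM (what is proved, stated in full; the proofs are below) =====
def Claim_equal_apply_keep_drop_py : Prop := ∀ (rolls : List Int) (keep_drop : Option String) (n : Option Int), Dom_apply_keep_drop_py rolls keep_drop n → Spec_apply_keep_drop_py rolls keep_drop n (apply_keep_drop_py rolls keep_drop n)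

-- ===== LEMMAS AND PROOFS =====

-- the comparison sorted2 uses on key (value, index), and its reversed form
def pvLt2 (a b : Int × Int) : Bool := decide (a.2 < b.2) || (!decide (b.2 < a.2) && decide (a.1 < b.1))
def pvBefore (rev : Bool) (a b : Int × Int) : Bool := if rev then pvLt2 b a else pvLt2 a b

theorem pv_sorted2_eq (xs : List (Int × Int)) (rev : Bool) :
    PySem.List.sorted2 xs (fun t => t.2) (fun t => t.1) rev
      = xs.foldl (fun acc x => PySem.List.insertBy (pvBefore rev) x acc) [] := by
  cases rev <;> rfl

theorem pv_before_trans (rev : Bool) (a b c : Int × Int)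
    (h1 : pvBefore rev a b = true) (h2 : pvBefore rev b c = true) : pvBefore rev a c = true := by
  cases rev <;> simp only [pvBefore, pvLt2, Bool.false_eq_true, if_true, if_false, Bool.or_eq_true,
    Bool.and_eq_true, Bool.not_eq_true', decide_eq_true_eq, decide_eq_false_iff_not] at * <;> omega

theorem pv_before_asym (rev : Bool) (a b : Int × Int)
    (h : pvBefore rev a b = true) : ¬ pvBefore rev b a = true := by
  cases rev <;> simp only [pvBefore, pvLt2, Bool.false_eq_true, if_true, if_false, Bool.or_eq_true,
    Bool.and_eq_true, Bool.not_eq_true', decide_eq_true_eq, decide_eq_false_iff_not] at * <;> omega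

theorem pv_before_total (rev : Bool) (a b : Int × Int) (h : a.1 < b.1) :
    pvBefore rev a b = true ∨ pvBefore rev b a = true := by
  cases rev <;> simp only [pvBefore, pvLt2, Bool.false_eq_true, if_true, if_false, Bool.or_eq_true,
    Bool.and_eq_true, Bool.not_eq_true', decide_eq_true_eq, decide_eq_false_iff_not] <;> omega

theorem pv_insertBy_pairwise {α : Type} (before : α → α → Bool)
    (htr : ∀ a b c, before a b = true → before b c = true → before a c = true)
    (x : α) (acc : List α)
    (hp : acc.Pairwise (fun a b => before a b = true))
    (htot : ∀ y ∈ acc, before x y = true ∨ before y x = true) :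
    (PySem.List.insertBy before x acc).Pairwise (fun a b => before a b = true) := by
  induction acc with
  | nil => simp [PySem.List.insertBy]
  | cons y ys ih =>
    rw [List.pairwise_cons] at hp
    obtain ⟨hy, hys⟩ := hp
    by_cases h : before x y = true
    · simp only [PySem.List.insertBy, h, if_true]
      refine List.Pairwise.cons ?_ (List.Pairwise.cons hy hys)
      intro z hz
      rcases List.mem_cons.mp hz with rfl | hz'
      · exact h
      · exact htr _ _ _ h (hy z hz')
    · simp only [PySem.List.insertBy, h]
      refine List.Pairwise.cons ?_ (ih hys (fun z hz => htot z (List.mem_cons_of_mem _ hz)))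
      intro z hz
      rcases (PySem.List.mem_insertBy before x z ys).mp hz with rfl | hz'
      · rcases htot y List.mem_cons_self with h' | h'
        · exact absurd h' h
        · exact h'
      · exact hy z hz'

theorem pv_foldl_insertBy_pairwise {α : Type} (before : α → α → Bool)
    (htr : ∀ a b c, before a b = true → before b c = true → before a c = true)
    (xs acc : List α)
    (htot : xs.Pairwise (fun a b => before a b = true ∨ before b a = true))
    (hacc : acc.Pairwise (fun a b => before a b = true))
    (hconn : ∀ x ∈ xs, ∀ y ∈ acc, before x y = true ∨ before y x = true) :
    (xs.foldl (fun acc x => PySem.List.insertBy before x acc) acc).Pairwise (fun a b => before a b = true) := by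
  induction xs generalizing acc with
  | nil => simpa using hacc
  | cons x rest ih =>
    rw [List.pairwise_cons] at htot
    obtain ⟨hx, hrest⟩ := htot
    simp only [List.foldl_cons]
    refine ih _ hrest ?_ ?_
    · exact pv_insertBy_pairwise before htr x acc hacc (fun y hy => hconn x List.mem_cons_self y hy)
    · intro z hz y hy
      rcases (PySem.List.mem_insertBy before x y acc).mp hy with rfl | hy'
      · rcases hx z hz with h' | h'
        · exact Or.inr h'
        · exact Or.inl h'
      · exact hconn z (List.mem_cons_of_mem _ hz) y hy'

theorem pv_mem_take_iff {α : Type} (before : α → α → Bool)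
    (hasym : ∀ a b, before a b = true → ¬ before b a = true)
    (s : List α) (hp : s.Pairwise (fun a b => before a b = true))
    (x : α) (hx : x ∈ s) (m : Nat) :
    x ∈ s.take m ↔ s.countP (fun y => before y x) < m := by
  induction s generalizing m with
  | nil => cases hx
  | cons h t ih =>
    rw [List.pairwise_cons] at hp
    obtain ⟨hh, hp'⟩ := hp
    rcases List.mem_cons.mp hx with rfl | hxt
    · have hirr : before x x = false := by
        by_cases hb : before x x = true
        · exact absurd hb (hasym _ _ hb)
        · simpa using hb
      have hc : t.countP (fun y => before y x) = 0 := by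
        rw [List.countP_eq_zero]
        intro y hy
        simpa using hasym _ _ (hh y hy)
      cases m with
      | zero => simp
      | succ m => simp [List.take_succ_cons, hc, hirr]
    · have hbx : before h x = true := hh x hxt
      have hne : x ≠ h := by
        rintro rfl
        exact absurd hbx (fun hb => hasym _ _ hb hb)
      cases m with
      | zero => simp
      | succ m =>
        rw [List.take_succ_cons, List.countP_cons]
        simp only [hbx, if_true, List.mem_cons]
        constructor
        · rintro (rfl | hmem)
          · exact absurd rfl hne
          · have := (ih hp' hxt m).mp hmem; omega
        · intro hlt
          exact Or.inr ((ih hp' hxt m).mpr (by omega))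

theorem pv_enum_fst_inj {α : Type} (xs : List α) {i : Int} {v w : α}
    (h1 : (i, v) ∈ PySem.List.enumerate xs) (h2 : (i, w) ∈ PySem.List.enumerate xs) : v = w := by
  rw [PySem.List.mem_enumerate_iff] at h1 h2
  obtain ⟨k, hk, hkv⟩ := h1
  obtain ⟨k', hk', hkv'⟩ := h2
  obtain ⟨hik, hv⟩ := Prod.mk.injEq .. ▸ hkv
  obtain ⟨hik', hv'⟩ := Prod.mk.injEq .. ▸ hkv'
  have : k = k' := by omega
  subst this; rw [hv, hv']

theorem pv_clamp (ln : Nat) (nv : Int) (h : nv ≠ 0) :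
    ((PySem.List.clampIdx ln nv : Nat) : Int) = if 0 < nv then min nv (ln : Int) else max ((ln : Int) + nv) 0 := by
  simp only [PySem.List.clampIdx]
  split_ifs <;> omega

-- i is in the selected slice of the sorted pairs  ↔  its selection-order rank is < m
theorem pv_keepset_iff (rolls : List Int) (nv : Int) (hnv : nv ≠ 0) (rev : Bool)
    {i v : Int} (hm : (i, v) ∈ PySem.List.enumerate rolls) :
    (i ∈ (PySem.List.slice (PySem.List.sorted2 (PySem.List.enumerate rolls) (fun t => t.2) (fun t => t.1) rev) none (some nv)).map (fun t : Int × Int => t.1))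
    ↔ (((PySem.List.enumerate rolls).countP (fun y => pvBefore rev y (i, v)) : Int)
        < (if 0 < nv then min nv ((rolls.length : Int)) else max ((rolls.length : Int) + nv) 0)) := by
  have hperm : (PySem.List.sorted2 (PySem.List.enumerate rolls) (fun t : Int × Int => t.2) (fun t => t.1) rev).Perm (PySem.List.enumerate rolls) :=
    PySem.List.sorted2_perm _ _ _ _
  set E := PySem.List.enumerate rolls with hE
  set s := PySem.List.sorted2 E (fun t : Int × Int => t.2) (fun t => t.1) rev with hs
  have hlen : s.length = rolls.length := by
    rw [hperm.length_eq, hE, PySem.List.length_enumerate]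
  have hslice : PySem.List.slice s none (some nv) = s.take (PySem.List.clampIdx s.length nv) := by
    simp [PySem.List.slice]
  have hp : s.Pairwise (fun a b => pvBefore rev a b = true) := by
    rw [hs, pv_sorted2_eq]
    refine pv_foldl_insertBy_pairwise _ (pv_before_trans rev) _ _ ?_ (by simp) (by simp)
    refine (PySem.List.pairwise_lt_enumerate rolls 0).imp ?_
    intro a b hab
    exact pv_before_total rev a b hab
  have hxs : (i, v) ∈ s := hperm.mem_iff.mpr hm
  rw [hslice]
  constructor
  · rintro hmem
    obtain ⟨t, htK, hti⟩ := List.mem_map.mp hmem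
    have hts : t ∈ s := List.take_subset _ _ htK
    have htE : t ∈ E := hperm.mem_iff.mp hts
    have : t = (i, v) := by
      obtain ⟨t1, t2⟩ := t
      simp only at hti
      subst hti
      exact congrArg (Prod.mk t1) (pv_enum_fst_inj rolls htE hm)
    subst this
    have := (pv_mem_take_iff _ (pv_before_asym rev) s hp _ hxs _).mp htK
    rw [hperm.countP_eq] at this
    rw [hlen] at this
    rw [← pv_clamp rolls.length nv hnv]
    exact_mod_cast this
  · intro hlt
    rw [← pv_clamp rolls.length nv hnv] at hlt
    have hcnt : s.countP (fun y => pvBefore rev y (i, v)) = E.countP (fun y => pvBefore rev y (i, v)) :=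
      hperm.countP_eq _
    have : (i, v) ∈ s.take (PySem.List.clampIdx s.length nv) := by
      refine (pv_mem_take_iff _ (pv_before_asym rev) s hp _ hxs _).mpr ?_
      rw [hcnt, hlen]
      exact_mod_cast hlt
    exact List.mem_map.mpr ⟨(i, v), this, rfl⟩

theorem pv_outranked_eq (high : Bool) (rolls : List Int) (i v : Int) :
    pvOutranked high rolls i v
      = ((PySem.List.enumerate rolls).countP (fun y => pvBefore high y (i, v)) : Int) := by
  unfold pvOutranked
  rw [PySem.List.foldl_ite_add_one
    (p := fun t : Int × Int => if high then (v < t.2 ∨ (t.2 = v ∧ i < t.1)) else (t.2 < v ∨ (t.2 = v ∧ t.1 < i)))]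
  rw [zero_add, Int.natCast_inj]
  apply List.countP_congr
  intro y _
  cases high <;>
    simp only [pvBefore, pvLt2, Bool.false_eq_true, if_true, if_false, decide_eq_true_eq,
      Bool.or_eq_true, Bool.and_eq_true, Bool.not_eq_true', decide_eq_false_iff_not] <;>
    constructor <;> intro hx <;> omega

theorem pv_foldl_split {α β : Type} (P : α → Bool) (f : α → β) (l : List α) (a b : List β) :
    l.foldl (fun acc t => if P t then (acc.1 ++ [f t], acc.2) else (acc.1, acc.2 ++ [f t])) (a, b)
      = (a ++ (l.filter P).map f, b ++ (l.filter (fun t => !P t)).map f) := by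
  induction l generalizing a b with
  | nil => simp
  | cons x xs ih => by_cases h : P x <;> simp [h, ih]

theorem pv_mem_map_fst_filter (rolls : List Int) (C : Int × Int → Bool) {i v : Int}
    (hm : (i, v) ∈ PySem.List.enumerate rolls) :
    (i ∈ ((PySem.List.enumerate rolls).filter C).map (fun u : Int × Int => u.1)) ↔ C (i, v) = true := by
  constructor
  · intro hmem
    obtain ⟨u, huf, hfst⟩ := List.mem_map.mp hmem
    obtain ⟨huE, hC⟩ := List.mem_filter.mp huf
    obtain ⟨u1, u2⟩ := u
    simp only at hfst
    subst hfst
    have : u2 = v := pv_enum_fst_inj rolls huE hm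
    subst this
    exact hC
  · intro hC
    exact List.mem_map.mpr ⟨(i, v), List.mem_filter.mpr ⟨hm, hC⟩, rfl⟩

theorem pv_Q_keep (rolls : List Int) (nv : Int) (hnv : nv ≠ 0) (rev : Bool) (t : Int × Int)
    (ht : t ∈ PySem.List.enumerate rolls) :
    PySem.Set.contains (PySem.Set.ofList ((PySem.List.slice (PySem.List.sorted2 (PySem.List.enumerate rolls) (fun u => u.2) (fun u => u.1) rev) none (some nv)).map (fun u : Int × Int => u.1))) t.1
    = decide (pvOutranked rev rolls t.1 t.2 < (if 0 < nv then min nv ((rolls.length : Int)) else max ((rolls.length : Int) + nv) 0)) := by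
  obtain ⟨i, v⟩ := t
  rw [Bool.eq_iff_iff, PySem.Set.contains_iff, PySem.Set.mem_ofList, decide_eq_true_eq,
    pv_outranked_eq]
  exact pv_keepset_iff rolls nv hnv rev ht

theorem pv_Q_drop (rolls : List Int) (nv : Int) (hnv : nv ≠ 0) (rev : Bool) (t : Int × Int)
    (ht : t ∈ PySem.List.enumerate rolls) :
    PySem.Set.contains (PySem.Set.ofList (((PySem.List.enumerate rolls).filter (fun u => !(PySem.Set.contains (PySem.Set.ofList ((PySem.List.slice (PySem.List.sorted2 (PySem.List.enumerate rolls) (fun u => u.2) (fun u => u.1) rev) none (some nv)).map (fun u : Int × Int => u.1))) u.1))).map (fun u : Int × Int => u.1))) t.1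
    = !decide (pvOutranked rev rolls t.1 t.2 < (if 0 < nv then min nv ((rolls.length : Int)) else max ((rolls.length : Int) + nv) 0)) := by
  obtain ⟨i, v⟩ := t
  rw [Bool.eq_iff_iff, PySem.Set.contains_iff, PySem.Set.mem_ofList,
    pv_mem_map_fst_filter rolls _ ht, pv_Q_keep rolls nv hnv rev (i, v) ht]

-- ===== VERDICT (by name: the statement is the Claim_ definition above) =====
theorem apply_keep_drop_py_spec : Claim_equal_apply_keep_drop_py := by
  intro rolls keep_drop n _
  unfold Spec_apply_keep_drop_py
  unfold apply_keep_drop_py apply_keep_drop_py_alt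
  by_cases hemp : rolls.isEmpty
  · simp [hemp]
  · rw [if_neg hemp, if_neg hemp]
    cases keep_drop with
    | none => simp
    | some kd =>
      cases n with
      | none => simp
      | some nv =>
        by_cases hkd0 : kd = ""
        · simp [hkd0]
        · by_cases hnv : nv = 0
          · simp [hnv]
          · have hnvb : (nv == 0) = false := by simp [hnv]
            by_cases h1 : kd = "kh"
            · subst h1
              simp only [Option.getD_some, beq_self_eq_true, String.reduceBEq, hnvb, Bool.or_false, Bool.not_true, Bool.false_eq_true, if_false, if_true, beq_true]
              rw [pv_foldl_split
                (P := fun t : Int × Int => decide (pvOutranked true rolls t.1 t.2 <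
                  if 0 < nv then min nv ((rolls.length : Int)) else max ((rolls.length : Int) + nv) 0))
                (f := fun t : Int × Int => t.2)]
              simp only [List.nil_append, Prod.mk.injEq]
              constructor
              · exact congrArg _ (List.filter_congr (fun t ht => pv_Q_keep rolls nv hnv true t ht))
              · exact congrArg _ (List.filter_congr (fun t ht => by
                  rw [pv_Q_keep rolls nv hnv true t ht]))
            · by_cases h2 : kd = "kl"
              · subst h2
                simp only [Option.getD_some, beq_self_eq_true, String.reduceBEq, hnvb, Bool.or_false, Bool.or_true, Bool.not_true, Bool.false_eq_true, if_false, if_true, beq_true]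
                rw [pv_foldl_split
                  (P := fun t : Int × Int => decide (pvOutranked false rolls t.1 t.2 <
                    if 0 < nv then min nv ((rolls.length : Int)) else max ((rolls.length : Int) + nv) 0))
                  (f := fun t : Int × Int => t.2)]
                simp only [List.nil_append, Prod.mk.injEq]
                constructor
                · exact congrArg _ (List.filter_congr (fun t ht => pv_Q_keep rolls nv hnv false t ht))
                · exact congrArg _ (List.filter_congr (fun t ht => by
                    rw [pv_Q_keep rolls nv hnv false t ht]))
              · by_cases h3 : kd = "dh"
                · subst h3
                  simp only [Option.getD_some, beq_self_eq_true, String.reduceBEq, hnvb, Bool.or_false, Bool.or_true, Bool.not_true, Bool.false_eq_true, if_false, if_true, beq_false]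
                  rw [pv_foldl_split
                    (P := fun t : Int × Int => !decide (pvOutranked true rolls t.1 t.2 <
                      if 0 < nv then min nv ((rolls.length : Int)) else max ((rolls.length : Int) + nv) 0))
                    (f := fun t : Int × Int => t.2)]
                  simp only [List.nil_append, Prod.mk.injEq]
                  constructor
                  · exact congrArg _ (List.filter_congr (fun t ht => pv_Q_drop rolls nv hnv true t ht))
                  · exact congrArg _ (List.filter_congr (fun t ht => by
                      rw [pv_Q_drop rolls nv hnv true t ht]))
                · by_cases h4 : kd = "dl"
                  · subst h4
                    simp only [Option.getD_some, beq_self_eq_true, String.reduceBEq, hnvb, Bool.or_false, Bool.or_true, Bool.not_true, Bool.false_eq_true, if_false, if_true, beq_false]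
                    rw [pv_foldl_split
                      (P := fun t : Int × Int => !decide (pvOutranked false rolls t.1 t.2 <
                        if 0 < nv then min nv ((rolls.length : Int)) else max ((rolls.length : Int) + nv) 0))
                      (f := fun t : Int × Int => t.2)]
                    simp only [List.nil_append, Prod.mk.injEq]
                    constructor
                    · exact congrArg _ (List.filter_congr (fun t ht => pv_Q_drop rolls nv hnv false t ht))
                    · exact congrArg _ (List.filter_congr (fun t ht => by
                        rw [pv_Q_drop rolls nv hnv false t ht]))
                  · -- unknown keep_drop string: A keeps every index, B returns (rolls, [])
                    have hkd0b : (kd == "") = false := by simp [hkd0]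
                    have hb1 : (kd == "kh") = false := by simp [h1]
                    have hb2 : (kd == "kl") = false := by simp [h2]
                    have hb3 : (kd == "dh") = false := by simp [h3]
                    have hb4 : (kd == "dl") = false := by simp [h4]
                    simp only [Option.getD_some, hkd0b, hnvb, hb1, hb2, hb3, hb4, Bool.or_false, Bool.or_true, Bool.not_false, Bool.false_eq_true, if_false, if_true]
                    have hQ : ∀ t ∈ PySem.List.enumerate rolls,
                        PySem.Set.contains (PySem.Set.ofList (PySem.List.pyRange 0 (rolls.length : Int))) (t : Int × Int).1 = true := by
                      rintro ⟨i, v⟩ ht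
                      rw [PySem.Set.contains_iff, PySem.Set.mem_ofList, PySem.List.mem_pyRange_one]
                      rw [PySem.List.mem_enumerate_iff] at ht
                      obtain ⟨k, hk, hkv⟩ := ht
                      obtain ⟨hik, -⟩ := Prod.mk.injEq .. ▸ hkv
                      omega
                    rw [List.filter_congr hQ, List.filter_congr (fun t ht => by rw [hQ t ht] : ∀ t ∈ PySem.List.enumerate rolls, (!PySem.Set.contains (PySem.Set.ofList (PySem.List.pyRange 0 (rolls.length : Int))) (t : Int × Int).1) = (!true))]
                    simp [PySem.List.map_snd_enumerate]
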